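-- pv_equiv track=rewrite | github.com/yifan2/mpi4py-python | mpi_dijkstra.py | split_mat
-- ===== SOURCE A (Python) =====
-- def split_mat(matrix,k,source):#将矩阵进行分组
--     res=[]
--     tmp=[]
--     width=len(matrix)//k
--     for i in range(k-1):
--         tmp=[row[i*width:(i+1)*width] for row in matrix]
--         res.append(tmp)
--     res.append([row[(k-1)*width:] for row in matrix])
--     return res
-- ===== SOURCE B (Python) =====
-- def split_mat(matrix, k, source):  # chunk each row by successive take/drop, then transpose rows x blocks
--     width = len(matrix) // k
--
--     def chunks(row):
--         parts = []
--         rest = row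
--         for _ in range(k - 1):
--             parts.append(rest[:width])
--             rest = rest[width:]
--         parts.append(rest)
--         return parts
--
--     per_row = [chunks(row) for row in matrix]
--     return [[pr[i] for pr in per_row] for i in range(k)]
-- ===== Notes on version B (the rewrite author's own statement) =====
-- stated objective: alternative
-- what changed: Replaces A's block-major index-slice double loop by a two-stage algorithm: each row is first split into k chunks by successive take/drop on a shrinking remainder (no start/stop index arithmetic), and the resulting rows-by-blocks structure is then transposed into the blocks-by-rows output.
-- outside the precondition, e.g. on split_mat([[1]], -1, 0): A returns [[[]]], B returns []; on split_mat([], -2, 0): A returns [[]], B returns []; on split_mat([[1]], 0, 0): A raises ZeroDivisionError, B raises ZeroDivisionError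
import Mathlib
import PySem

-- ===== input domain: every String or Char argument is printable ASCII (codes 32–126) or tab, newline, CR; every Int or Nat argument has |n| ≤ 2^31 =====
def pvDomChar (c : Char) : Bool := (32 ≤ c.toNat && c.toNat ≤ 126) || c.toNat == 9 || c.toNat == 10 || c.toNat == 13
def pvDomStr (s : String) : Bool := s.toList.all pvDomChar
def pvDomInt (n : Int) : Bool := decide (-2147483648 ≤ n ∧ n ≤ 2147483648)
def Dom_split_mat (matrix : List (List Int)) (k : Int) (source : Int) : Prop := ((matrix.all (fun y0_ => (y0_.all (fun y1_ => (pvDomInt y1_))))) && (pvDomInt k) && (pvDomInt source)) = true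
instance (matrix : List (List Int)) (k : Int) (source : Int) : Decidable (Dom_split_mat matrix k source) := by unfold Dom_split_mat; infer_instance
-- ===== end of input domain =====

-- B replaces A's block-major index-slice double loop by per-row successive
-- take/drop chunking followed by a transpose of the rows-by-blocks structure
-- (alternative decomposition; same cost).

-- ===== PORT A =====
def split_mat (matrix : List (List Int)) (k : Int) (source : Int) : List (List (List Int)) :=
  let width := PySem.Int.floordiv (matrix.length : Int) k
  let res := (PySem.List.pyRange 0 (k - 1)).foldl
    (fun res i => res ++ [matrix.map (fun row =>
      PySem.List.slice row (some (i * width)) (some ((i + 1) * width)))]) []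
  res ++ [matrix.map (fun row => PySem.List.slice row (some ((k - 1) * width)) none)]

-- ===== PORT B =====
-- the 'chunks' helper of Source B: split a row by successive rest[:width] / rest[width:]
def pvChunks (k width : Int) (row : List Int) : List (List Int) :=
  let p := (PySem.List.pyRange 0 (k - 1)).foldl
    (fun (p : List (List Int) × List Int) _ =>
      (p.1 ++ [PySem.List.slice p.2 none (some width)],
       PySem.List.slice p.2 (some width) none))
    ([], row)
  p.1 ++ [p.2]

def split_mat_alt (matrix : List (List Int)) (k : Int) (source : Int) : List (List (List Int)) :=
  let width := PySem.Int.floordiv (matrix.length : Int) k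
  let per_row := matrix.map (pvChunks k width)
  -- pr[i]: under Pre_ (1 ≤ k) every pr has length k, so the [] default of getD is never reached
  (PySem.List.pyRange 0 k).map (fun i =>
    per_row.map (fun pr => (PySem.List.pyGet? pr i).getD []))

-- ===== PRECONDITION & SPEC =====
-- Pre_ excludes k ≤ 0: at k = 0 Python A raises ZeroDivisionError, and for k < 0 A's
-- value is an accident of negative floor-division width and negative-slice clamping;
-- B's transpose pass naturally returns [] there (range(k) is empty).
def Pre_split_mat (matrix : List (List Int)) (k : Int) (source : Int) : Prop := 1 ≤ k
instance (matrix : List (List Int)) (k : Int) (source : Int) : Decidable (Pre_split_mat matrix k source) := by unfold Pre_split_mat; infer_instance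

def pvWitness_split_mat : List (List Int) × Int × Int := ([[1, 2, 3], [4, 5, 6], [7, 8, 9]], 2, 0)

def Spec_split_mat (matrix : List (List Int)) (k : Int) (source : Int) (out : List (List (List Int))) : Prop := out = split_mat_alt matrix k source
instance (matrix : List (List Int)) (k : Int) (source : Int) (out : List (List (List Int))) : Decidable (Spec_split_mat matrix k source out) := by unfold Spec_split_mat; infer_instance

-- ===== CLAIM (what is proved, stated in full; the proofs are below) =====
def Claim_equal_split_mat : Prop := ∀ (matrix : List (List Int)) (k : Int) (source : Int), Dom_split_mat matrix k source → Pre_split_mat matrix k source → Spec_split_mat matrix k source (split_mat matrix k source)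

-- ===== LEMMAS AND PROOFS =====

-- closed form of Source B's chunk loop: after t steps the parts are the first t
-- width-chunks and the remainder is the row with t*width elements dropped
theorem pv_chunk_loop (wn : Nat) (row : List Int) (t : Nat) :
    (List.range t).foldl
      (fun (p : List (List Int) × List Int) _ =>
        (p.1 ++ [p.2.take wn], p.2.drop wn)) ([], row) =
      ((List.range t).map (fun i => (row.drop (i * wn)).take wn), row.drop (t * wn)) := by
  induction t with
  | zero => simp
  | succ t ih =>
    rw [List.range_succ, List.foldl_append, List.foldl_cons, List.foldl_nil, ih,
      List.map_append]
    simp [List.drop_drop, Nat.succ_mul, Nat.add_comm]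

theorem pv_chunks_closed (m : Nat) (hm : 1 ≤ m) (wn : Nat) (row : List Int) :
    pvChunks (m : Int) (wn : Int) row =
      (List.range (m - 1)).map (fun i => (row.drop (i * wn)).take wn) ++
        [row.drop ((m - 1) * wn)] := by
  unfold pvChunks
  have hc : (m : Int) - 1 = ((m - 1 : Nat) : Int) := by omega
  rw [hc, PySem.List.pyRange_zero_natCast, List.foldl_map]
  have hstep : (fun (p : List (List Int) × List Int) (i : Nat) =>
      (p.1 ++ [PySem.List.slice p.2 none (some (wn : Int))],
       PySem.List.slice p.2 (some (wn : Int)) none)) =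
      fun (p : List (List Int) × List Int) _ =>
        (p.1 ++ [p.2.take wn], p.2.drop wn) := by
    funext p i
    rw [PySem.List.slice_to_natCast, PySem.List.slice_from_natCast]
  rw [hstep, pv_chunk_loop]

-- indexing the chunk list: element j of pvChunks (j < m)
theorem pv_chunks_get (m : Nat) (hm : 1 ≤ m) (wn : Nat) (row : List Int) (j : Nat)
    (hj : j < m) :
    (PySem.List.pyGet? (pvChunks (m : Int) (wn : Int) row) (j : Int)).getD [] =
      if j < m - 1 then (row.drop (j * wn)).take wn else row.drop ((m - 1) * wn) := by
  rw [pv_chunks_closed m hm wn row, PySem.List.pyGet?_natCast]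
  rcases Nat.lt_or_ge j (m - 1) with hj1 | hj1
  · rw [List.getElem?_append_left (by simp [hj1]), List.getElem?_map,
      List.getElem?_range hj1, if_pos hj1]
    rfl
  · have hje : j = m - 1 := by omega
    subst hje
    rw [List.getElem?_append_right (by simp), if_neg (by omega)]
    simp

-- A as a map over the block indices
theorem pv_a_closed (matrix : List (List Int)) (m : Nat) (hm : 1 ≤ m) (wn : Nat)
    (hw : PySem.Int.floordiv (matrix.length : Int) (m : Int) = (wn : Int)) (source : Int) :
    split_mat matrix (m : Int) source =
      (List.range (m - 1)).map (fun j => matrix.map (fun row => (row.drop (j * wn)).take wn)) ++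
        [matrix.map (fun row => row.drop ((m - 1) * wn))] := by
  unfold split_mat
  have hc : (m : Int) - 1 = ((m - 1 : Nat) : Int) := by omega
  rw [hw, hc, PySem.List.pyRange_zero_natCast]
  dsimp only
  rw [List.foldl_map,
    PySem.List.foldl_append_singleton_eq_map, List.nil_append]
  congr 1
  · apply List.map_congr_left
    intro j _
    congr 1
    funext row
    have h1 : (j : Int) * (wn : Int) = ((j * wn : Nat) : Int) := by push_cast; ring
    have h2 : (j : Int) * (wn : Int) + (wn : Int) = ((j * wn + wn : Nat) : Int) := by
      push_cast; ring
    calc PySem.List.slice row (some ((j : Int) * (wn : Int)))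
          (some (((j : Int) + 1) * (wn : Int)))
        = PySem.List.slice row (some ((j * wn : Nat) : Int))
            (some ((j * wn + wn : Nat) : Int)) := by rw [← h1, ← h2]; ring_nf
      _ = (row.drop (j * wn)).take (j * wn + wn - j * wn) := PySem.List.slice_natCast _ _ _
      _ = (row.drop (j * wn)).take wn := by rw [Nat.add_sub_cancel_left]
  · congr 1
    apply List.map_congr_left
    intro row _
    have h1 : ((m - 1 : Nat) : Int) * (wn : Int) = (((m - 1) * wn : Nat) : Int) := by
      push_cast; ring
    rw [h1, PySem.List.slice_from_natCast]

-- B as the same map over block indices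
theorem pv_b_closed (matrix : List (List Int)) (m : Nat) (hm : 1 ≤ m) (wn : Nat)
    (hw : PySem.Int.floordiv (matrix.length : Int) (m : Int) = (wn : Int)) (source : Int) :
    split_mat_alt matrix (m : Int) source =
      (List.range (m - 1)).map (fun j => matrix.map (fun row => (row.drop (j * wn)).take wn)) ++
        [matrix.map (fun row => row.drop ((m - 1) * wn))] := by
  unfold split_mat_alt
  rw [hw, PySem.List.pyRange_zero_natCast, List.map_map]
  have hms : m = (m - 1) + 1 := by omega
  rw [hms, List.range_succ, List.map_append, List.map_cons, List.map_nil]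
  rw [← hms]
  congr 1
  · apply List.map_congr_left
    intro j hj
    rw [List.mem_range] at hj
    simp only [Function.comp, List.map_map]
    apply List.map_congr_left
    intro row _
    simp only [Function.comp]
    rw [pv_chunks_get m hm wn row j (by omega), if_pos hj]
  · simp only [Function.comp, List.map_map]
    congr 1
    apply List.map_congr_left
    intro row _
    simp only [Function.comp]
    rw [pv_chunks_get m hm wn row (m - 1) (by omega), if_neg (by omega)]

-- ===== VERDICT (by name: the statement is the Claim_ definition above) =====
theorem split_mat_spec : Claim_equal_split_mat := by
  intro matrix k source _ hpre
  have hk1 : 1 ≤ k := hpre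
  unfold Spec_split_mat
  have hk : k = ((k.toNat : Nat) : Int) := by omega
  have hm : 1 ≤ k.toNat := by omega
  rw [hk]
  have hw : PySem.Int.floordiv (matrix.length : Int) ((k.toNat : Nat) : Int) =
      ((matrix.length / k.toNat : Nat) : Int) := PySem.Int.floordiv_natCast _ _
  rw [pv_a_closed matrix k.toNat hm (matrix.length / k.toNat) hw source,
    pv_b_closed matrix k.toNat hm (matrix.length / k.toNat) hw source]
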